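-- pv_equiv track=rewrite | github.com/orelbn/advent-of-code-2025 | day-9.py | build_prefix_sum_from_scanlines
-- ===== SOURCE A (Python) =====
-- from bisect import bisect_left
--
-- def interval_contains(merged: list[tuple[int, int]], value: int) -> bool:
--     """Return True if value is contained in any merged inclusive interval."""
--     lo = 0
--     hi = len(merged) - 1
--     while lo <= hi:
--         mid = (lo + hi) // 2
--         start, end = merged[mid]
--         if value < start:
--             hi = mid - 1
--         elif value > end:
--             lo = mid + 1
--         else:
--             return True
--     return False
--
-- def build_crossing_x_values_for_row(
--     y: int, vertical_edges: list[tuple[int, int, int]]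
-- ) -> list[int]:
--     """Return sorted x values where a horizontal ray at this y crosses vertical edges.
--
--     Uses a half-open y-range [y_min, y_max) to avoid counting polygon vertices twice.
--     """
--
--     crossing_x_values: list[int] = []
--     for x, y0, y1 in vertical_edges:
--         if y0 == y1:
--             continue
--         if y0 <= y < y1:
--             crossing_x_values.append(x)
--     crossing_x_values.sort()
--     return crossing_x_values
--
-- def tile_is_on_boundary(
--     x: int,
--     y: int,
--     vertical_intervals_by_x: dict[int, list[tuple[int, int]]],
--     horizontal_intervals_by_y: dict[int, list[tuple[int, int]]],
-- ) -> bool: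
--     """Return True if the tile (x, y) lies on the polygon boundary."""
--
--     horizontal_intervals = horizontal_intervals_by_y.get(y)
--     if horizontal_intervals is not None and interval_contains(horizontal_intervals, x):
--         return True
--
--     vertical_intervals = vertical_intervals_by_x.get(x)
--     if vertical_intervals is not None and interval_contains(vertical_intervals, y):
--         return True
--
--     return False
--
-- def build_prefix_sum_from_scanlines(
--     x_edges: list[int],
--     y_edges: list[int],
--     vertical_edges: list[tuple[int, int, int]],
--     vertical_intervals_by_x: dict[int, list[tuple[int, int]]],
--     horizontal_intervals_by_y: dict[int, list[tuple[int, int]]],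
-- ) -> list[list[int]]:
--     """Build 2D prefix sum of allowed tiles using scanline parity and boundary checks."""
--
--     x_cell_widths = [x_edges[i + 1] - x_edges[i] for i in range(len(x_edges) - 1)]
--     y_cell_heights = [y_edges[j + 1] - y_edges[j] for j in range(len(y_edges) - 1)]
--
--     column_count = len(x_cell_widths)
--     row_count = len(y_cell_heights)
--     prefix_sum = [[0] * (column_count + 1) for _ in range(row_count + 1)]
--
--     for row_index in range(row_count):
--         y = y_edges[row_index]
--         crossing_x_values = build_crossing_x_values_for_row(y, vertical_edges)
--
--         running_row_sum = 0
--         for column_index in range(column_count):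
--             x = x_edges[column_index]
--
--             on_boundary = tile_is_on_boundary(
--                 x, y, vertical_intervals_by_x, horizontal_intervals_by_y
--             )
--
--             if on_boundary:
--                 inside_or_boundary = True
--             else:
--                 # even/odd rule: crossings strictly to the left of this tile
--                 inside_or_boundary = (bisect_left(crossing_x_values, x) % 2) == 1
--
--             allowed_tiles = (
--                 x_cell_widths[column_index] * y_cell_heights[row_index]
--                 if inside_or_boundary
--                 else 0
--             )
--
--             running_row_sum += allowed_tiles
--             prefix_sum[row_index + 1][column_index + 1] = (
--                 prefix_sum[row_index][column_index + 1] + running_row_sum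
--             )
--
--     return prefix_sum
-- ===== SOURCE B (Python) =====
-- def interval_contains(merged, value):
--     lo = 0
--     hi = len(merged) - 1
--     while lo <= hi:
--         mid = (lo + hi) // 2
--         start, end = merged[mid]
--         if value < start:
--             hi = mid - 1
--         elif value > end:
--             lo = mid + 1
--         else:
--             return True
--     return False
--
-- def tile_is_on_boundary(x, y, vertical_intervals_by_x, horizontal_intervals_by_y):
--     horizontal_intervals = horizontal_intervals_by_y.get(y)
--     if horizontal_intervals is not None and interval_contains(horizontal_intervals, x):
--         return True
--     vertical_intervals = vertical_intervals_by_x.get(x)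
--     if vertical_intervals is not None and interval_contains(vertical_intervals, y):
--         return True
--     return False
--
-- def crossings_left_of(x, y, vertical_edges):
--     """Parity count: vertical edges crossed by the ray at y strictly left of x.
--
--     Replaces A's sort + bisect_left: no sorted crossing list is ever built."""
--     return sum(
--         1
--         for vx, y0, y1 in vertical_edges
--         if y0 != y1 and y0 <= y < y1 and vx < x
--     )
--
-- def row_prefix(values):
--     """1-D prefix sums of one row of cell values, with a leading 0."""
--     acc = [0]
--     s = 0
--     for v in values:
--         s += v
--         acc.append(s)
--     return acc
--
-- def build_prefix_sum_from_scanlines(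
--     x_edges,
--     y_edges,
--     vertical_edges,
--     vertical_intervals_by_x,
--     horizontal_intervals_by_y,
-- ):
--     """Per-cell parity by direct counting (no sorting, no binary search over
--     crossings), then each prefix row = previous prefix row + this row's 1-D
--     prefix, added elementwise."""
--     widths = [x_edges[i + 1] - x_edges[i] for i in range(len(x_edges) - 1)]
--     heights = [y_edges[j + 1] - y_edges[j] for j in range(len(y_edges) - 1)]
--
--     prefix = [[0] * (len(widths) + 1)]
--     for r in range(len(heights)):
--         y = y_edges[r]
--         row_values = []
--         for c in range(len(widths)):
--             x = x_edges[c]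
--             if tile_is_on_boundary(x, y, vertical_intervals_by_x, horizontal_intervals_by_y):
--                 row_values.append(widths[c] * heights[r])
--             elif crossings_left_of(x, y, vertical_edges) % 2 == 1:
--                 row_values.append(widths[c] * heights[r])
--             else:
--                 row_values.append(0)
--         prefix.append([p + q for p, q in zip(prefix[-1], row_prefix(row_values))])
--     return prefix
-- ===== Notes on version B (the rewrite author's own statement) =====
-- stated objective: alternative
-- what changed: B computes each cell's even/odd parity by directly counting vertical edges crossed strictly left of the cell (no sorted crossing list, no bisect_left), and builds the prefix table by elementwise vector addition: each new prefix row = previous prefix row + the 1-D prefix of the current row's values, replacing A's fused running_row_sum writing into a preallocated 2D array.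
import Mathlib
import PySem

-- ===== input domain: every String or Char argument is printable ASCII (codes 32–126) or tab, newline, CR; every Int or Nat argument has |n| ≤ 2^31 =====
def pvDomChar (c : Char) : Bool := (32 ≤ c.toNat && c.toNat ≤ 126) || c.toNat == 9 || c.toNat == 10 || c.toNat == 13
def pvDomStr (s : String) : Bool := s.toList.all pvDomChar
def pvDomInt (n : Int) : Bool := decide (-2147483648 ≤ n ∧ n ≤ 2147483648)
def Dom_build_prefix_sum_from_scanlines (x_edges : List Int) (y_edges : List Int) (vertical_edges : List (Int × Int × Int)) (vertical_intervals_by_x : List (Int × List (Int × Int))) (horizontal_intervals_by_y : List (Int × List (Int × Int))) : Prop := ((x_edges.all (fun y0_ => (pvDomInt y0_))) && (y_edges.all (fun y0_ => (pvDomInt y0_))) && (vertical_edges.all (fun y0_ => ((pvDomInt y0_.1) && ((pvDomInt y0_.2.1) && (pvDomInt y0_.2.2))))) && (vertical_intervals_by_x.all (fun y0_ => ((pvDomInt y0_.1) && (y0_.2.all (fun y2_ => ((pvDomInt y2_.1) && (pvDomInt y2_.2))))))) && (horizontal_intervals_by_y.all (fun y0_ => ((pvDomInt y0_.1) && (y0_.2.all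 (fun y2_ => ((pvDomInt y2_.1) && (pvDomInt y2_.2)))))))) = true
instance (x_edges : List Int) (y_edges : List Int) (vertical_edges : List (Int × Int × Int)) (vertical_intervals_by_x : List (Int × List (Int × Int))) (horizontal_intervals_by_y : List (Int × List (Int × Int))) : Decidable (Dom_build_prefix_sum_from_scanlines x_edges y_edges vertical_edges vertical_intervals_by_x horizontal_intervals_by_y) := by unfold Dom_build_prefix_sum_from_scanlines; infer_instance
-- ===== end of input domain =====

-- B computes each cell's parity by directly counting vertical edges strictly left of the
-- cell (no sorted crossing list, no bisect_left) and builds each prefix row as the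
-- elementwise sum of the previous prefix row and the current row's 1-D prefix
-- (objective: alternative mechanism, same result; boundary helper shared unchanged).

-- ===== PORT A =====
-- shared helper: interval_contains' binary-search while-loop; fuel = len+1 is an upper
-- bound on iterations (the half-open search interval shrinks each step), so it is exact
def pvIcLoop (merged : List (Int × Int)) (value : Int) (lo hi : Int) : Nat → Bool
  | 0 => false
  | fuel+1 =>
    if lo ≤ hi then
      let mid := PySem.Int.floordiv (lo + hi) 2
      match PySem.List.pyGet? merged mid with
      | none => false   -- unreachable: 0 ≤ lo ≤ mid ≤ hi < len whenever the loop runs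
      | some se =>
        if value < se.1 then pvIcLoop merged value lo (mid - 1) fuel
        else if se.2 < value then pvIcLoop merged value (mid + 1) hi fuel
        else true
    else false

def pvIntervalContains (merged : List (Int × Int)) (value : Int) : Bool :=
  pvIcLoop merged value 0 ((merged.length : Int) - 1) (merged.length + 1)

-- A-side helper: build_crossing_x_values_for_row
def pvCrossings (y : Int) (ve : List (Int × Int × Int)) : List Int :=
  PySem.List.sorted
    (ve.foldl (fun acc t =>
      if t.2.1 = t.2.2 then acc
      else if t.2.1 ≤ y ∧ y < t.2.2 then acc ++ [t.1] else acc) [])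
    (fun x => x)

-- shared helper: tile_is_on_boundary (dict .get = first-match lookup)
def pvOnBoundary (x y : Int) (vix hiy : List (Int × List (Int × Int))) : Bool :=
  (((PySem.Dict.mk hiy).get? y).elim false (fun h => pvIntervalContains h x)) ||
  (((PySem.Dict.mk vix).get? x).elim false (fun v => pvIntervalContains v y))

-- A-side helper: one cell's allowed-tile count (boundary, else bisect_left parity)
def pvCellValue (x y w h : Int) (crossings : List Int) (vix hiy : List (Int × List (Int × Int))) : Int :=
  if pvOnBoundary x y vix hiy then w * h
  else if PySem.List.bisectLeft crossings x % 2 == 1 then w * h else 0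

-- shared helper: consecutive-edge differences; indices are always in range so getD is exact
def pvDiffs (es : List Int) : List Int :=
  (List.range (es.length - 1)).map (fun i => es.getD (i+1) 0 - es.getD i 0)

def build_prefix_sum_from_scanlines (x_edges : List Int) (y_edges : List Int) (vertical_edges : List (Int × Int × Int)) (vertical_intervals_by_x : List (Int × List (Int × Int))) (horizontal_intervals_by_y : List (Int × List (Int × Int))) : List (List Int) :=
  let widths := pvDiffs x_edges
  let heights := pvDiffs y_edges
  -- prefix_sum rows are written once, row r+1 from row r with a running row sum;
  -- the fold state is (rows written so far, the last written row)
  let row0 : List Int := List.replicate (widths.length + 1) 0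
  ((List.range heights.length).foldl (fun (st : List (List Int) × List Int) r =>
      let y := y_edges.getD r 0
      let crossings := pvCrossings y vertical_edges
      let h := heights.getD r 0
      let newRow : List Int := 0 ::
        ((List.range widths.length).foldl (fun (s : Int × List Int) c =>
            let run := s.1 + pvCellValue (x_edges.getD c 0) y (widths.getD c 0) h crossings vertical_intervals_by_x horizontal_intervals_by_y
            (run, s.2 ++ [st.2.getD (c+1) 0 + run])) (0, [])).2
      (st.1 ++ [newRow], newRow)) ([row0], row0)).1

-- ===== PORT B =====
-- B-side helper: crossings_left_of — sum(1 for … if …) over vertical_edges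
def pvCrossLeft (x y : Int) (ve : List (Int × Int × Int)) : Nat :=
  ve.countP (fun t => decide (t.2.1 ≠ t.2.2 ∧ t.2.1 ≤ y ∧ y < t.2.2 ∧ t.1 < x))

-- B-side helper: row_prefix — 1-D prefix sums with a leading 0
def pvRowPrefix (vals : List Int) : List Int :=
  (vals.foldl (fun (st : Int × List Int) v => (st.1 + v, st.2 ++ [st.1 + v])) (0, [0])).2

def build_prefix_sum_from_scanlines_alt (x_edges : List Int) (y_edges : List Int) (vertical_edges : List (Int × Int × Int)) (vertical_intervals_by_x : List (Int × List (Int × Int))) (horizontal_intervals_by_y : List (Int × List (Int × Int))) : List (List Int) :=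
  let widths := pvDiffs x_edges
  let heights := pvDiffs y_edges
  let row0 : List Int := List.replicate (widths.length + 1) 0
  -- python appends to `prefix` and reads prefix[-1]; state = (rows so far, last row)
  ((List.range heights.length).foldl (fun (st : List (List Int) × List Int) r =>
      let y := y_edges.getD r 0
      let rowVals : List Int := (List.range widths.length).foldl (fun acc c =>
          let x := x_edges.getD c 0
          acc ++ [if pvOnBoundary x y vertical_intervals_by_x horizontal_intervals_by_y then
                    widths.getD c 0 * heights.getD r 0
                  else if pvCrossLeft x y vertical_edges % 2 == 1 then
                    widths.getD c 0 * heights.getD r 0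
                  else 0]) []
      let newRow : List Int := List.zipWith (· + ·) st.2 (pvRowPrefix rowVals)
      (st.1 ++ [newRow], newRow)) ([row0], row0)).1

-- ===== PRECONDITION & SPEC =====
def Spec_build_prefix_sum_from_scanlines (x_edges : List Int) (y_edges : List Int) (vertical_edges : List (Int × Int × Int)) (vertical_intervals_by_x : List (Int × List (Int × Int))) (horizontal_intervals_by_y : List (Int × List (Int × Int))) (out : List (List Int)) : Prop := out = build_prefix_sum_from_scanlines_alt x_edges y_edges vertical_edges vertical_intervals_by_x horizontal_intervals_by_y
instance (x_edges : List Int) (y_edges : List Int) (vertical_edges : List (Int × Int × Int)) (vertical_intervals_by_x : List (Int × List (Int × Int))) (horizontal_intervals_by_y : List (Int × List (Int × Int))) (out : List (List Int)) : Decidable (Spec_build_prefix_sum_from_scanlines x_edges y_edges vertical_edges vertical_intervals_by_x horizontal_intervals_by_y out) := by unfold Spec_build_prefix_sum_from_scanlines; infer_instance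

-- ===== CLAIM =====
def Claim_equal_build_prefix_sum_from_scanlines : Prop := ∀ (x_edges : List Int) (y_edges : List Int) (vertical_edges : List (Int × Int × Int)) (vertical_intervals_by_x : List (Int × List (Int × Int))) (horizontal_intervals_by_y : List (Int × List (Int × Int))), Dom_build_prefix_sum_from_scanlines x_edges y_edges vertical_edges vertical_intervals_by_x horizontal_intervals_by_y → Spec_build_prefix_sum_from_scanlines x_edges y_edges vertical_edges vertical_intervals_by_x horizontal_intervals_by_y (build_prefix_sum_from_scanlines x_edges y_edges vertical_edges vertical_intervals_by_x horizontal_intervals_by_y)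

-- ===== LEMMAS AND PROOFS =====

-- bisect_left on a ≤-sorted list is the number of elements strictly below x
theorem pv_bisect_eq_countP (xs : List Int) (x : Int)
    (hs : xs.Pairwise (· ≤ ·)) :
    PySem.List.bisectLeft xs x = xs.countP (fun a => decide (a < x)) := by
  obtain ⟨hk, hlt, hge⟩ := PySem.List.bisectLeft_spec xs x hs
  set k := PySem.List.bisectLeft xs x with hkdef
  have hsplit : xs = xs.take k ++ xs.drop k := (List.take_append_drop k xs).symm
  have h1 : (xs.take k).countP (fun a => decide (a < x)) = k := by
    have hall : ∀ a ∈ xs.take k, (fun a => decide (a < x)) a = true := by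
      intro a ha
      obtain ⟨j, hj, rfl⟩ := List.getElem_of_mem ha
      have hjk : j < k := lt_of_lt_of_le hj (by simp)
      have hjlen : j < xs.length := lt_of_lt_of_le hjk hk
      have := hlt j hjlen hjk
      simp [List.getElem_take] at this ⊢
      exact this
    rw [List.countP_eq_length.mpr hall, List.length_take]
    omega
  have h2 : (xs.drop k).countP (fun a => decide (a < x)) = 0 := by
    apply List.countP_eq_zero.mpr
    intro a ha
    obtain ⟨j, hj, rfl⟩ := List.getElem_of_mem ha
    have hjlen : k + j < xs.length := by simp at hj; omega
    have := hge (k + j) hjlen (by omega)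
    simp [List.getElem_drop] at this ⊢
    omega
  conv_rhs => rw [hsplit]
  rw [List.countP_append, h1, h2]
  omega

-- A's per-row crossings fold is a filter + map
theorem pv_crossings_raw (y : Int) (ve : List (Int × Int × Int)) :
    ve.foldl (fun acc t =>
      if t.2.1 = t.2.2 then acc
      else if t.2.1 ≤ y ∧ y < t.2.2 then acc ++ [t.1] else acc) []
    = (ve.filter (fun t => decide (t.2.1 ≠ t.2.2 ∧ t.2.1 ≤ y ∧ y < t.2.2))).map (·.1) := by
  have : ∀ (acc : List Int), ve.foldl (fun acc t =>
      if t.2.1 = t.2.2 then acc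
      else if t.2.1 ≤ y ∧ y < t.2.2 then acc ++ [t.1] else acc) acc
      = acc ++ (ve.filter (fun t => decide (t.2.1 ≠ t.2.2 ∧ t.2.1 ≤ y ∧ y < t.2.2))).map (·.1) := by
    induction ve with
    | nil => simp
    | cons t tl ih =>
      intro acc
      by_cases h1 : t.2.1 = t.2.2
      · simp [h1, ih]
      · by_cases h2 : t.2.1 ≤ y ∧ y < t.2.2
        · simp [h1, h2, ih]
        · simp [h1, h2, ih]
  simpa using this []
-- A's sorted-crossings bisect parity equals B's direct count
theorem pv_parity_eq (x y : Int) (ve : List (Int × Int × Int)) :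
    PySem.List.bisectLeft (pvCrossings y ve) x = pvCrossLeft x y ve := by
  unfold pvCrossings pvCrossLeft
  rw [pv_crossings_raw]
  set L := (ve.filter (fun t => decide (t.2.1 ≠ t.2.2 ∧ t.2.1 ≤ y ∧ y < t.2.2))).map (·.1) with hL
  have hs : (PySem.List.sorted L (fun x => x) false).Pairwise (· ≤ ·) := by
    simpa using PySem.List.sorted_pairwise L (fun x => x)
  rw [pv_bisect_eq_countP _ x hs,
      (PySem.List.sorted_perm L (fun x => x) false).countP_eq]
  rw [hL, List.countP_map, List.countP_filter]
  apply List.countP_congr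
  intro t _
  simp [Function.comp]
  tauto

-- A's inner loop: running sum + appended entries, in closed form
theorem pv_rowA (f : Nat → Int) (prev : List Int) (n : Nat) :
    (List.range n).foldl (fun (s : Int × List Int) c =>
        (s.1 + f c, s.2 ++ [prev.getD (c+1) 0 + (s.1 + f c)])) (0, [])
    = (((List.range n).map f).sum,
       (List.range n).map (fun c => prev.getD (c+1) 0 + ((List.range (c+1)).map f).sum)) := by
  induction n with
  | zero => simp
  | succ n ih =>
    rw [List.range_succ, List.foldl_append, ih]
    simp [List.range_succ]

-- B's row-values fold is a map over the column range
theorem pv_rowVals (f : Nat → Int) (n : Nat) :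
    (List.range n).foldl (fun acc c => acc ++ [f c]) [] = (List.range n).map f := by
  induction n with
  | zero => simp
  | succ n ih => rw [List.range_succ, List.foldl_append, ih]; simp

-- B's row_prefix, in closed form: leading 0 then the partial sums
theorem pv_rowPrefix (f : Nat → Int) (n : Nat) :
    pvRowPrefix ((List.range n).map f)
    = 0 :: (List.range n).map (fun c => ((List.range (c+1)).map f).sum) := by
  unfold pvRowPrefix
  have : ∀ m, (((List.range m).map f).foldl
      (fun (st : Int × List Int) v => (st.1 + v, st.2 ++ [st.1 + v])) (0, [0]))
      = (((List.range m).map f).sum,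
         0 :: (List.range m).map (fun c => ((List.range (c+1)).map f).sum)) := by
    intro m
    induction m with
    | zero => simp
    | succ m ih =>
      rw [List.range_succ, List.map_append, List.foldl_append, ih]
      simp [List.range_succ]
  rw [this]

-- elementwise addition of prev with (0 :: partial sums) equals A's row shape
theorem pv_zip_core (prev : List Int) (g : Nat → Int) (n : Nat) (hl : prev.length = n) :
    List.zipWith (· + ·) prev ((List.range n).map g)
    = (List.range n).map (fun c => prev.getD c 0 + g c) := by
  induction prev generalizing n g with
  | nil => subst hl; simp
  | cons a t ih =>
    subst hl
    rw [List.length_cons, List.range_succ_eq_map]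
    simp only [List.map_cons, List.zipWith_cons_cons, List.map_map]
    rw [ih (g ∘ Nat.succ) t.length rfl]
    simp [Function.comp]

theorem pv_zip_row (prev : List Int) (g : Nat → Int) (n : Nat)
    (hl : prev.length = n + 1) (h0 : prev.getD 0 0 = 0) :
    List.zipWith (· + ·) prev (0 :: (List.range n).map g)
    = 0 :: (List.range n).map (fun c => prev.getD (c+1) 0 + g c) := by
  cases prev with
  | nil => simp at hl
  | cons a t =>
    have ha : a = 0 := by simpa using h0
    have ht : t.length = n := by simpa using hl
    simp only [List.zipWith_cons_cons, ha, zero_add]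
    rw [pv_zip_core t g n ht]
    rfl

-- the two outer folds agree step by step, under an invariant on the carried state
theorem pv_foldl_inv_congr {α β : Type} (P : α → Prop) (f g : α → β → α) (l : List β)
    (a : α) (hP : P a) (hstep : ∀ x b, P x → f x b = g x b ∧ P (f x b)) :
    l.foldl f a = l.foldl g a ∧ P (l.foldl f a) := by
  induction l generalizing a with
  | nil => exact ⟨rfl, hP⟩
  | cons b t ih =>
    obtain ⟨he, hp⟩ := hstep a b hP
    simpa [he] using ih (g a b) (he ▸ hp)

-- ===== VERDICT =====
theorem build_prefix_sum_from_scanlines_spec : Claim_equal_build_prefix_sum_from_scanlines := by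
  intro xe ye ve vix hiy _dom
  unfold Spec_build_prefix_sum_from_scanlines
  unfold build_prefix_sum_from_scanlines build_prefix_sum_from_scanlines_alt
  apply congrArg Prod.fst
  refine (pv_foldl_inv_congr
    (fun st => st.2.length = (pvDiffs xe).length + 1 ∧ st.2.getD 0 0 = 0) _ _
    (List.range (pvDiffs ye).length)
    ([List.replicate ((pvDiffs xe).length + 1) 0], List.replicate ((pvDiffs xe).length + 1) 0)
    ?_ ?_).1
  · simp [List.replicate_succ]
  · intro st r hst
    obtain ⟨hlen, h0⟩ := hst
    have hA := pv_rowA (fun c =>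
      pvCellValue (xe.getD c 0) (ye.getD r 0) ((pvDiffs xe).getD c 0) ((pvDiffs ye).getD r 0)
        (pvCrossings (ye.getD r 0) ve) vix hiy) st.2 (pvDiffs xe).length
    have hVals : (List.range (pvDiffs xe).length).foldl (fun acc c =>
        acc ++ [if pvOnBoundary (xe.getD c 0) (ye.getD r 0) vix hiy then
          (pvDiffs xe).getD c 0 * (pvDiffs ye).getD r 0
        else if pvCrossLeft (xe.getD c 0) (ye.getD r 0) ve % 2 == 1 then
          (pvDiffs xe).getD c 0 * (pvDiffs ye).getD r 0
        else 0]) []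
        = (List.range (pvDiffs xe).length).map (fun c =>
          pvCellValue (xe.getD c 0) (ye.getD r 0) ((pvDiffs xe).getD c 0) ((pvDiffs ye).getD r 0)
            (pvCrossings (ye.getD r 0) ve) vix hiy) := by
      rw [← pv_rowVals]
      apply PySem.List.foldl_congr_mem
      intro acc j _
      simp only [pvCellValue, pv_parity_eq]
    have hz := pv_zip_row st.2 (fun c => ((List.range (c+1)).map (fun k =>
      pvCellValue (xe.getD k 0) (ye.getD r 0) ((pvDiffs xe).getD k 0) ((pvDiffs ye).getD r 0)
        (pvCrossings (ye.getD r 0) ve) vix hiy)).sum) (pvDiffs xe).length hlen h0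
    refine ⟨?_, ?_, ?_⟩
    · simp only [hA, hVals, pv_rowPrefix, hz]
    · simp only [hA]
      simp
    · simp only [hA]
      simp
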